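-- pv_equiv track=rewrite | github.com/TheGuja/CICS-110 | HW03_Lists+Tuples+Strings/cipher.py | odd_even_decrypt
-- ===== SOURCE A (Python) =====
-- def odd_even_decrypt(s):
--
--     s = list(s)
--
--     first_half = s[:len(s) // 2]
--     second_half = s[len(s) // 2:]
--
--     index_first_half = 1
--     index_second_half = 0
--
--     for element in first_half:
--         s[index_first_half] = element
--         index_first_half += 2
--
--     for element in second_half:
--         s[index_second_half] = element
--         index_second_half += 2
--
--     s = "".join(s)
--
--     return s
-- ===== SOURCE B (Python) =====
-- def odd_even_decrypt(s):
--     n = len(s)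
--     half = n // 2
--     return "".join(s[half + i // 2] if i % 2 == 0 else s[i // 2] for i in range(n))
-- ===== Notes on version B (the rewrite author's own statement) =====
-- stated objective: alternative
-- what changed: Replaces A's split-into-halves plus two scatter loops writing back into a mutable list copy by a single forward pass over range(n) that computes each output character directly from a closed-form index (s[half+i//2] for even i, s[i//2] for odd i) and joins them.
import Mathlib
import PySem

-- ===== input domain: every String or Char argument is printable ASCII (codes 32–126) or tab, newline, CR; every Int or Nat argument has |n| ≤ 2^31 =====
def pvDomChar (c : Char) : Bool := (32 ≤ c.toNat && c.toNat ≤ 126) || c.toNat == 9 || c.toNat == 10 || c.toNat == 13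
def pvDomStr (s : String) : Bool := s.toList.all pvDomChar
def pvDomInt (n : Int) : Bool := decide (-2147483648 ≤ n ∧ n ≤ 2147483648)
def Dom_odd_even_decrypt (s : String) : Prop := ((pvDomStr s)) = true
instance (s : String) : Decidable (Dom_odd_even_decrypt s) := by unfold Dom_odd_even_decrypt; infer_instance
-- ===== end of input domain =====

-- B replaces A's split-and-scatter (two slices written back into the list at stepped
-- indices) by one forward pass emitting each output character from a closed-form index.

-- ===== PORT A =====
-- the 'for element in half: s[idx] = element; idx += 2' loops of A
def pvScatter (xs : List Char) (acc : List Char) (start : Int) : List Char × Int :=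
  xs.foldl (fun st e => (PySem.List.pySetD st.1 st.2 e, st.2 + 2)) (acc, start)

def odd_even_decrypt (s : String) : String :=
  let l := s.toList
  let first_half := PySem.List.slice l none (some ((l.length : Int) / 2))
  let second_half := PySem.List.slice l (some ((l.length : Int) / 2)) none
  let l1 := (pvScatter first_half l 1).1
  let l2 := (pvScatter second_half l1 0).1
  String.ofList l2

-- ===== PORT B =====
def odd_even_decrypt_alt (s : String) : String :=
  let n := s.toList.length
  let half : Int := (n : Int) / 2
  String.ofList (((PySem.List.pyRange 0 n 1).map (fun i =>
    if PySem.Int.mod i 2 == 0 then PySem.List.pyGetD s.toList (half + PySem.Int.floordiv i 2) ' '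
    else PySem.List.pyGetD s.toList (PySem.Int.floordiv i 2) ' ')))

-- ===== PRECONDITION & SPEC =====
def Spec_odd_even_decrypt (s : String) (out : String) : Prop := out = odd_even_decrypt_alt s
instance (s : String) (out : String) : Decidable (Spec_odd_even_decrypt s out) := by unfold Spec_odd_even_decrypt; infer_instance

-- ===== CLAIM (what is proved, stated in full; the proofs are below) =====
def Claim_equal_odd_even_decrypt : Prop := ∀ (s : String), Dom_odd_even_decrypt s → Spec_odd_even_decrypt s (odd_even_decrypt s)

-- ===== LEMMAS AND PROOFS =====

theorem pvScatter_length (xs : List Char) : ∀ (acc : List Char) (start : Int),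
    (pvScatter xs acc start).1.length = acc.length := by
  induction xs with
  | nil => intro acc start; rfl
  | cons e rest ih =>
    intro acc start
    show (pvScatter rest (PySem.List.pySetD acc start e) (start + 2)).1.length = _
    rw [ih, PySem.List.length_pySetD]

theorem pvScatter_getD (d : Char) (xs : List Char) : ∀ (acc : List Char) (s0 : Nat),
    (∀ j, j < xs.length → s0 + 2 * j < acc.length) →
    ∀ m : Nat,
    (pvScatter xs acc ((s0 : Nat) : Int)).1.getD m d =
      if s0 ≤ m ∧ (m - s0) % 2 = 0 ∧ (m - s0) / 2 < xs.length
      then xs.getD ((m - s0) / 2) d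
      else acc.getD m d := by
  induction xs with
  | nil =>
    intro acc s0 _ m
    simp [pvScatter]
  | cons e rest ih =>
    intro acc s0 h m
    have hs0 : s0 < acc.length := by have := h 0 (by simp); omega
    have hstep : ((s0 : Int)) + 2 = (((s0 + 2 : Nat)) : Int) := by push_cast; ring
    have hset : PySem.List.pySetD acc ((s0 : Nat) : Int) e = acc.set s0 e := by
      simp [PySem.List.pySetD_natCast]
    have hlc : (e :: rest).length = rest.length + 1 := rfl
    show (pvScatter rest (PySem.List.pySetD acc ((s0 : Nat) : Int) e) (((s0 : Nat) : Int) + 2)).1.getD m d = _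
    rw [hstep, hset, ih (acc.set s0 e) (s0 + 2)
      (by intro j hj; rw [List.length_set]; have := h (j + 1) (by simpa using hj); omega)]
    by_cases hm : m = s0
    · subst hm
      rw [if_neg (by omega : ¬ (m + 2 ≤ m ∧ (m - (m + 2)) % 2 = 0 ∧ (m - (m + 2)) / 2 < rest.length)),
          if_pos (⟨le_refl m, by omega, by simp⟩ : m ≤ m ∧ (m - m) % 2 = 0 ∧ (m - m) / 2 < (e :: rest).length)]
      simp [List.getD_eq_getElem?_getD, List.getElem?_set_self hs0]
    · by_cases hc : s0 + 2 ≤ m ∧ (m - (s0 + 2)) % 2 = 0 ∧ (m - (s0 + 2)) / 2 < rest.length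
      · rw [if_pos hc, if_pos (by omega : s0 ≤ m ∧ (m - s0) % 2 = 0 ∧ (m - s0) / 2 < (e :: rest).length)]
        have hidx : (m - s0) / 2 = (m - (s0 + 2)) / 2 + 1 := by omega
        rw [hidx]
        simp
      · rw [if_neg hc, if_neg (by omega : ¬ (s0 ≤ m ∧ (m - s0) % 2 = 0 ∧ (m - s0) / 2 < (e :: rest).length))]
        simp [List.getD_eq_getElem?_getD, List.getElem?_set_ne (by omega : s0 ≠ m)]

-- the core equality between the two list computations
theorem pv_main (l : List Char) :
    (pvScatter (PySem.List.slice l (some ((l.length : Int) / 2)) none)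
       (pvScatter (PySem.List.slice l none (some ((l.length : Int) / 2))) l 1).1 0).1 =
    (PySem.List.pyRange 0 (l.length : Int) 1).map (fun i =>
       if PySem.Int.mod i 2 == 0 then PySem.List.pyGetD l (((l.length : Int) / 2) + PySem.Int.floordiv i 2) ' '
       else PySem.List.pyGetD l (PySem.Int.floordiv i 2) ' ') := by
  have hhalf : ((l.length : Int) / 2) = (((l.length / 2 : Nat)) : Int) := by omega
  rw [hhalf, PySem.List.slice_to_natCast, PySem.List.slice_from_natCast]
  set n := l.length with hn
  have hlen1 : (pvScatter (l.take (n / 2)) l 1).1.length = n := pvScatter_length _ l 1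
  have hlen2 : (pvScatter (l.drop (n / 2)) (pvScatter (l.take (n / 2)) l 1).1 0).1.length = n := by
    rw [pvScatter_length, hlen1]
  apply List.ext_getElem
    (by rw [hlen2, List.length_map, PySem.List.length_pyRange_one]; omega)
  intro m h1 h2
  have hmn : m < n := by omega
  have h2' : ((2 : Nat) : Int) = 2 := rfl
  have hmod : PySem.Int.mod ((m : Nat) : Int) 2 = (((m % 2 : Nat)) : Int) := by
    rw [← h2']; exact PySem.Int.mod_natCast m 2
  have hdiv : PySem.Int.floordiv ((m : Nat) : Int) 2 = (((m / 2 : Nat)) : Int) := by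
    rw [← h2']; exact PySem.Int.floordiv_natCast m 2
  -- right-hand side: the closed-form character at index m
  have hrhs : ((PySem.List.pyRange 0 (n : Int) 1).map (fun i =>
      if PySem.Int.mod i 2 == 0 then PySem.List.pyGetD l ((((n / 2 : Nat)) : Int) + PySem.Int.floordiv i 2) ' '
      else PySem.List.pyGetD l (PySem.Int.floordiv i 2) ' '))[m]'h2 =
      (if PySem.Int.mod ((m : Nat) : Int) 2 == 0
       then PySem.List.pyGetD l ((((n / 2 : Nat)) : Int) + PySem.Int.floordiv ((m : Nat) : Int) 2) ' '
       else PySem.List.pyGetD l (PySem.Int.floordiv ((m : Nat) : Int) 2) ' ') := by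
    simp [List.getElem_map, PySem.List.getElem_pyRange_one]
  rw [hrhs]
  -- left-hand side via the scatter lemmas
  have hget1 : (pvScatter (l.take (n / 2)) l ((1 : Nat) : Int)).1.getD m ' ' =
      if 1 ≤ m ∧ (m - 1) % 2 = 0 ∧ (m - 1) / 2 < (l.take (n / 2)).length
      then (l.take (n / 2)).getD ((m - 1) / 2) ' '
      else l.getD m ' ' :=
    pvScatter_getD ' ' (l.take (n / 2)) l 1
      (by intro j hj; simp only [List.length_take] at hj; omega) m
  have hget2 : (pvScatter (l.drop (n / 2)) (pvScatter (l.take (n / 2)) l 1).1 ((0 : Nat) : Int)).1.getD m ' ' =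
      if 0 ≤ m ∧ (m - 0) % 2 = 0 ∧ (m - 0) / 2 < (l.drop (n / 2)).length
      then (l.drop (n / 2)).getD ((m - 0) / 2) ' '
      else (pvScatter (l.take (n / 2)) l 1).1.getD m ' ' :=
    pvScatter_getD ' ' (l.drop (n / 2)) _ 0
      (by intro j hj; simp only [List.length_drop] at hj; rw [hlen1]; omega) m
  simp only [Nat.cast_zero, Nat.cast_one] at hget1 hget2
  rw [← List.getD_eq_getElem _ ' ' h1, hget2]
  by_cases hpar : m % 2 = 0
  · -- even position: second half element
    rw [if_pos (⟨Nat.zero_le m, by omega, by rw [List.length_drop]; omega⟩ :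
        0 ≤ m ∧ (m - 0) % 2 = 0 ∧ (m - 0) / 2 < (l.drop (n / 2)).length)]
    rw [if_pos (by rw [hmod, hpar]; rfl : (PySem.Int.mod ((m : Nat) : Int) 2 == 0) = true)]
    have hidx : (((n / 2 : Nat)) : Int) + PySem.Int.floordiv ((m : Nat) : Int) 2 = (((n / 2 + m / 2 : Nat)) : Int) := by
      rw [hdiv]; push_cast; ring
    rw [hidx, PySem.List.pyGetD_natCast]
    rw [Nat.sub_zero, List.getD_eq_getElem _ _ (by rw [List.length_drop]; omega),
        List.getD_eq_getElem _ _ (by omega : n / 2 + m / 2 < l.length), List.getElem_drop]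
  · -- odd position: first half element
    rw [if_neg (by intro hcc; omega :
        ¬ (0 ≤ m ∧ (m - 0) % 2 = 0 ∧ (m - 0) / 2 < (l.drop (n / 2)).length)), hget1]
    rw [if_pos (⟨by omega, by omega, by rw [List.length_take]; omega⟩ :
        1 ≤ m ∧ (m - 1) % 2 = 0 ∧ (m - 1) / 2 < (l.take (n / 2)).length)]
    have hm1 : m % 2 = 1 := by omega
    have hmod1 : (PySem.Int.mod ((m : Nat) : Int) 2 == 0) = false := by
      rw [hmod, hm1]; rfl
    rw [if_neg (by rw [hmod1]; exact Bool.false_ne_true)]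
    rw [hdiv, PySem.List.pyGetD_natCast]
    rw [(by omega : (m - 1) / 2 = m / 2)]
    rw [List.getD_eq_getElem _ _ (by rw [List.length_take]; omega),
        List.getD_eq_getElem _ _ (by omega : m / 2 < l.length), List.getElem_take]

-- ===== VERDICT (by name: the statement is the Claim_ definition above) =====
theorem odd_even_decrypt_spec : Claim_equal_odd_even_decrypt := by
  intro s _
  show odd_even_decrypt s = odd_even_decrypt_alt s
  simp only [odd_even_decrypt, odd_even_decrypt_alt]
  exact congrArg String.ofList (pv_main s.toList)
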